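-- pv_equiv track=rewrite | github.com/Leapense/problems | 23410번: Multiplication and Division by 2/gen.py | reachable_oracle
-- ===== SOURCE A (Python) =====
-- U32_BITS = 32
--
-- U32_MAX = (1 << U32_BITS) - 1
--
-- def reachable_oracle(x: int, y: int) -> bool:
--     x &= U32_MAX
--     y &= U32_MAX
--     if y == 0:
--         return True
--     for s in range(0, U32_BITS + 1):
--         max_m = U32_BITS - s
--         for m in range(0, max_m + 1):
--             mask = ((1 << m) - 1) if m > 0 else 0
--             seg = (x >> s) & mask
--             for p in range(0, U32_BITS - m + 1):
--                 cand = (seg << p) & U32_MAX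
--                 if cand == y:
--                     return True
--     return False
-- ===== SOURCE B (Python) =====
-- U32_BITS = 32
--
-- U32_MAX = (1 << U32_BITS) - 1
--
-- def reachable_oracle(x: int, y: int) -> bool:
--     x &= U32_MAX
--     y &= U32_MAX
--     if y == 0:
--         return True
--     v = y
--     while v % 2 == 0:
--         v //= 2
--     L = v.bit_length()
--     pat = (1 << L) - 1
--     return any(((x >> s) & pat) == v for s in range(U32_BITS - L + 1))
-- ===== Notes on version B (the rewrite author's own statement) =====
-- stated objective: alternative
-- what changed: Replaces the triple (s,m,p) enumeration of all shifted segments of x with a single canonical-pattern scan: strip y's trailing zeros to its odd core v of bit-length L and check whether v occurs as an L-bit window of x.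
import Mathlib
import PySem

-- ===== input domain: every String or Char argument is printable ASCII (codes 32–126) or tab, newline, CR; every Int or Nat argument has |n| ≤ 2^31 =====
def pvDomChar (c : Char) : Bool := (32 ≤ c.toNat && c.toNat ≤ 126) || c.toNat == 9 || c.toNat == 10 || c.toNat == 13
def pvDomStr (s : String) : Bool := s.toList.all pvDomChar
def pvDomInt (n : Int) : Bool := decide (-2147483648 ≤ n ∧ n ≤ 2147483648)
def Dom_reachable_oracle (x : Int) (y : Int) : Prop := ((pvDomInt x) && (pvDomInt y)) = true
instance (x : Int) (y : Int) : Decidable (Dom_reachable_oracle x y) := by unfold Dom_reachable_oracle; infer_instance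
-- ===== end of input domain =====

-- B replaces A's triple (s,m,p) enumeration of shifted segments by a single scan for
-- y's odd core as a bit-window of x: a different algorithm (alternative/simpler; O(W) loop
-- iterations instead of O(W^3), W = 32 — constant-factor on these fixed-width inputs).

-- ===== PORT A =====
def pvU32BITS : Nat := 32

def pvU32MAX : Int := (1 <<< pvU32BITS) - 1

def reachable_oracle (x : Int) (y : Int) : Bool :=
  let xm := PySem.Int.band x pvU32MAX
  let ym := PySem.Int.band y pvU32MAX
  if ym == 0 then true
  else
    -- the three nested for-loops with an early 'return True' = nested .any
    (List.range (pvU32BITS + 1)).any (fun s =>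
      let maxm := pvU32BITS - s
      (List.range (maxm + 1)).any (fun m =>
        let mask : Int := if 0 < m then (1 <<< m) - 1 else 0
        let seg := PySem.Int.band (xm >>> s) mask
        (List.range (pvU32BITS - m + 1)).any (fun p =>
          let cand := PySem.Int.band (seg <<< p) pvU32MAX
          cand == ym)))

-- ===== PORT B =====
-- Source B's 'while v % 2 == 0: v //= 2'; v stays a nonnegative int there, so Nat is exact
def pvOddCore (n : Nat) : Nat :=
  if h : n = 0 then 0
  else if n % 2 = 0 then pvOddCore (n / 2) else n
termination_by n
decreasing_by omega

def reachable_oracle_alt (x : Int) (y : Int) : Bool :=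
  let xm := PySem.Int.band x pvU32MAX
  let ym := PySem.Int.band y pvU32MAX
  if ym == 0 then true
  else
    let v : Nat := pvOddCore ym.toNat   -- ym ≥ 0 after masking, so .toNat is exact
    let L : Nat := PySem.Int.bitLength (v : Int)
    let pat : Int := (1 <<< L) - 1
    (List.range (pvU32BITS - L + 1)).any (fun s =>
      PySem.Int.band (xm >>> s) pat == (v : Int))

-- ===== PRECONDITION & SPEC =====
def Spec_reachable_oracle (x : Int) (y : Int) (out : Bool) : Prop := out = reachable_oracle_alt x y
instance (x : Int) (y : Int) (out : Bool) : Decidable (Spec_reachable_oracle x y out) := by unfold Spec_reachable_oracle; infer_instance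

-- ===== CLAIM (what is proved, stated in full; the proofs are below) =====
def Claim_equal_reachable_oracle : Prop := ∀ (x : Int) (y : Int), Dom_reachable_oracle x y → Spec_reachable_oracle x y (reachable_oracle x y)

-- ===== LEMMAS AND PROOFS =====

-- the value both ports mask an argument to: its residue mod 2^32, as a Nat
def pvMaskN (x : Int) : Nat := (x % (2^32)).toNat

lemma pv_band_mask (x : Int) : PySem.Int.band x pvU32MAX = ((pvMaskN x : Nat) : Int) := by
  have hmax : pvU32MAX = (4294967295 : Int) := by decide
  have htn : Int.toNat 4294967295 = 4294967295 := rfl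
  have hmask : ∀ a : Nat, a &&& 4294967295 = a % 4294967296 := fun a => Nat.and_two_pow_sub_one_eq_mod a 32
  unfold pvMaskN
  rw [hmax]
  simp only [PySem.Int.band]
  norm_num
  rw [htn]
  split_ifs with h1
  · rw [hmask]; omega
  · rw [Nat.land_comm, hmask]; omega

lemma pv_maskN_lt (x : Int) : pvMaskN x < 2^32 := by
  unfold pvMaskN; norm_num; omega

lemma pv_maskN_cast (n : Nat) : pvMaskN ((n : Nat) : Int) = n % 2^32 := by
  unfold pvMaskN
  omega

lemma pv_maskInt (m : Nat) : (((1 <<< m : Nat) : Int)) - 1 = ((2^m - 1 : Nat) : Int) := by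
  rw [Nat.shiftLeft_eq, one_mul, Int.natCast_sub Nat.one_le_two_pow]
  norm_num

lemma pv_seg_eq (a m : Nat) :
    PySem.Int.band ((a : Nat) : Int) (if 0 < m then (((1 <<< m : Nat) : Int)) - 1 else 0) = ((a % 2^m : Nat) : Int) := by
  rcases Nat.eq_zero_or_pos m with h | h
  · subst h
    rw [if_neg (by omega)]
    rw [PySem.Int.band_zero]
    simp [Nat.mod_one]
  · rw [if_pos h, pv_maskInt, PySem.Int.band_natCast, Nat.and_two_pow_sub_one_eq_mod]

lemma pv_bodyA (X Y s m p : Nat) :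
    ((PySem.Int.band ((PySem.Int.band (((X:Nat):Int) >>> s) (if 0 < m then (((1 <<< m : Nat) : Int)) - 1 else 0)) <<< p) pvU32MAX == ((Y:Nat):Int)) = true) ↔
    ((X / 2^s) % 2^m * 2^p) % 2^32 = Y := by
  rw [← Int.natCast_shiftRight, pv_seg_eq, ← Int.natCast_shiftLeft, pv_band_mask, pv_maskN_cast]
  simp only [beq_iff_eq, Nat.cast_inj, Nat.shiftRight_eq_div_pow, Nat.shiftLeft_eq]

lemma pv_bridgeA (x y : Int) :
    (reachable_oracle x y = true) ↔
    (pvMaskN y = 0 ∨ ∃ s, s < 33 ∧ ∃ m, m < 32 - s + 1 ∧ ∃ p, p < 32 - m + 1 ∧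
      ((pvMaskN x / 2^s) % 2^m * 2^p) % 2^32 = pvMaskN y) := by
  unfold reachable_oracle
  rw [pv_band_mask x, pv_band_mask y]
  by_cases h0 : pvMaskN y = 0
  · simp [h0]
  · have hc : (((pvMaskN y : Nat) : Int) == 0) = false := by simp [h0]
    simp only [hc, Bool.false_eq_true, if_false, List.any_eq_true, List.mem_range,
      pvU32BITS, pv_bodyA, h0, false_or]

lemma pv_bodyB (X v s L : Nat) :
    ((PySem.Int.band (((X:Nat):Int) >>> s) ((((1 <<< L : Nat) : Int)) - 1) == ((v:Nat):Int)) = true) ↔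
    (X / 2^s) % 2^L = v := by
  rw [← Int.natCast_shiftRight, pv_maskInt, PySem.Int.band_natCast, Nat.and_two_pow_sub_one_eq_mod]
  simp only [beq_iff_eq, Nat.cast_inj, Nat.shiftRight_eq_div_pow]

lemma pv_bridgeB (x y : Int) :
    (reachable_oracle_alt x y = true) ↔
    (pvMaskN y = 0 ∨ ∃ s, s < 32 - PySem.Int.bitLength ((pvOddCore (pvMaskN y) : Nat) : Int) + 1 ∧
      (pvMaskN x / 2^s) % 2^(PySem.Int.bitLength ((pvOddCore (pvMaskN y) : Nat) : Int)) = pvOddCore (pvMaskN y)) := by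
  unfold reachable_oracle_alt
  rw [pv_band_mask x, pv_band_mask y]
  by_cases h0 : pvMaskN y = 0
  · simp [h0]
  · have hc : (((pvMaskN y : Nat) : Int) == 0) = false := by simp [h0]
    simp only [hc, Bool.false_eq_true, if_false, Int.toNat_natCast, List.any_eq_true,
      List.mem_range, pvU32BITS, pv_bodyB, h0, false_or]

lemma pv_oddCore_spec (n : Nat) (h : n ≠ 0) :
    pvOddCore n % 2 = 1 ∧ ∃ t, pvOddCore n * 2^t = n := by
  induction n using Nat.strong_induction_on with
  | _ n ih =>
    rw [pvOddCore]
    simp only [h, dite_false]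
    by_cases he : n % 2 = 0
    · simp only [he, if_true]
      obtain ⟨h1, t, h2⟩ := ih (n / 2) (by omega) (by omega)
      refine ⟨h1, t + 1, ?_⟩
      rw [pow_succ, ← mul_assoc, h2]
      omega
    · simp only [he, if_false]
      exact ⟨by omega, 0, by omega⟩

lemma pv_oddCore_mul_pow (v t : Nat) (hv : v % 2 = 1) : pvOddCore (v * 2^t) = v := by
  induction t with
  | zero => rw [pvOddCore]; simp [hv]; omega
  | succ t ih =>
    rw [pvOddCore]
    have hv0 : 0 < v := by omega
    have hne : v * 2^(t+1) ≠ 0 := by positivity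
    have heven : (v * 2^(t+1)) % 2 = 0 := by
      have : 2 ∣ v * 2^(t+1) := Dvd.dvd.mul_left (dvd_pow_self 2 (by omega)) v
      omega
    simp only [hne, dite_false, heven, if_true]
    have h2 : v * 2^(t+1) = (v * 2^t) * 2 := by ring
    have : v * 2^(t+1) / 2 = v * 2^t := by rw [h2, Nat.mul_div_cancel _ (by omega)]
    rw [this, ih]

-- the heart: A's triple enumeration reaches Y iff Y's odd core occurs as a bit-window of X
lemma pv_main (X Y : Nat) (hX : X < 2^32) (hY : Y < 2^32) (hY0 : Y ≠ 0) :
    (∃ s, s < 33 ∧ ∃ m, m < 32 - s + 1 ∧ ∃ p, p < 32 - m + 1 ∧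
      ((X / 2^s) % 2^m * 2^p) % 2^32 = Y) ↔
    (∃ s, s < 32 - PySem.Int.bitLength ((pvOddCore Y : Nat) : Int) + 1 ∧
      (X / 2^s) % 2^(PySem.Int.bitLength ((pvOddCore Y : Nat) : Int)) = pvOddCore Y) := by
  obtain ⟨hodd, t, ht⟩ := pv_oddCore_spec Y hY0
  set v := pvOddCore Y with hvdef
  set L := PySem.Int.bitLength ((v : Nat) : Int) with hLdef
  have hvpos : 0 < v := by omega
  have hvL : v < 2^L := by
    have := PySem.Int.lt_two_pow_bitLength ((v : Nat) : Int)
    simpa using this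
  have hLv : 2^(L-1) ≤ v := by
    have := PySem.Int.two_pow_bitLength_le ((v : Nat) : Int) (by exact_mod_cast hvpos.ne')
    simpa using this
  have hLpos : 0 < L := by
    rcases Nat.eq_zero_or_pos L with h | h
    · rw [h] at hvL; omega
    · exact h
  have hL32 : L ≤ 32 := by
    have hvY : v ≤ Y := ht ▸ Nat.le_mul_of_pos_right v (Nat.pow_pos (a:=2) (by omega))
    have : 2^(L-1) < 2^32 := lt_of_le_of_lt (le_trans hLv hvY) hY
    have := (Nat.pow_lt_pow_iff_right (by omega : 1 < 2)).mp this
    omega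
  constructor
  · rintro ⟨s, hs, m, hm, p, hp, heq⟩
    set w := (X / 2^s) % 2^m with hwdef
    have hp32 : p ≤ 32 := by omega
    have h232 : (2^32 : Nat) = 2^(32-p) * 2^p := by rw [← pow_add]; congr 1; omega
    have step1 : (w * 2^p) % 2^32 = (w % 2^(32-p)) * 2^p := by
      rw [h232, Nat.mul_mod_mul_right]
    set u := w % 2^(32-p) with hudef
    have hu : u * 2^p = Y := by rw [← step1, heq]
    have hu0 : u ≠ 0 := by
      intro h; rw [h, zero_mul] at hu; exact hY0 hu.symm
    obtain ⟨hodd', j, hj⟩ := pv_oddCore_spec u hu0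
    set v' := pvOddCore u with hv'def
    have hY' : v' * 2^(j+p) = Y := by rw [pow_add, ← mul_assoc, hj, hu]
    have hcore : v = v' := by rw [hvdef, ← hY', pv_oddCore_mul_pow _ _ hodd']
    set k := min m (32-p) with hkdef
    have huk : u = (X / 2^s) % 2^k := by
      by_cases hmk : m ≤ 32 - p
      · have hkm : k = m := by omega
        have : w < 2^(32-p) := lt_of_lt_of_le (Nat.mod_lt _ (Nat.pow_pos (a:=2) (by omega))) (Nat.pow_le_pow_right (by omega) hmk)
        rw [hudef, Nat.mod_eq_of_lt this, hkm]
      · have hkp : k = 32 - p := by omega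
        rw [hudef, hwdef, Nat.mod_mod_of_dvd _ (pow_dvd_pow 2 (by omega)), hkp]
    have huklt : u < 2^k := huk ▸ Nat.mod_lt _ (Nat.pow_pos (a:=2) (by omega))
    have hv'pos : 0 < v' := by omega
    have hjk : j < k := by
      have : 2^j ≤ u := hj ▸ Nat.le_mul_of_pos_left _ hv'pos
      have := lt_of_le_of_lt this huklt
      exact (Nat.pow_lt_pow_iff_right (by omega : 1 < 2)).mp this
    have hv'div : v' = u / 2^j := by
      rw [← hj, Nat.mul_div_cancel _ (Nat.pow_pos (a:=2) (by omega))]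
    have h2k : (2^k : Nat) = 2^j * 2^(k-j) := by rw [← pow_add]; congr 1; omega
    have hwin : v' = (X / 2^(s+j)) % 2^(k-j) := by
      rw [hv'div, huk, h2k, Nat.mod_mul_right_div_self, Nat.div_div_eq_div_mul, ← pow_add]
    have hv'kj : v' < 2^(k-j) := hwin ▸ Nat.mod_lt _ (Nat.pow_pos (a:=2) (by omega))
    have hLkj : L ≤ k - j := by
      have : 2^(L-1) < 2^(k-j) := lt_of_le_of_lt (hcore ▸ hLv) hv'kj
      have := (Nat.pow_lt_pow_iff_right (by omega : 1 < 2)).mp this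
      omega
    have hfin : (X / 2^(s+j)) % 2^L = v' := by
      have h1 : (X / 2^(s+j)) % 2^L = ((X / 2^(s+j)) % 2^(k-j)) % 2^L :=
        (Nat.mod_mod_of_dvd _ (pow_dvd_pow 2 hLkj)).symm
      rw [h1, ← hwin, Nat.mod_eq_of_lt (hcore ▸ hvL)]
    have hsj32 : s + j ≤ 32 := by
      by_contra hc
      have : X < 2^(s+j) := lt_of_lt_of_le hX (Nat.pow_le_pow_right (by omega) (by omega))
      have : X / 2^(s+j) = 0 := Nat.div_eq_of_lt this
      rw [this] at hfin
      simp at hfin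
      omega
    have hbound : s + j < 32 - L + 1 := by
      have hdiv : X / 2^(s+j) < 2^(32-(s+j)) := by
        apply Nat.div_lt_of_lt_mul
        rw [← pow_add]
        have : s + j + (32 - (s+j)) = 32 := by omega
        rw [this]; exact hX
      have hle : v' ≤ X / 2^(s+j) := hwin ▸ Nat.mod_le _ _
      have : 2^(L-1) < 2^(32-(s+j)) := lt_of_le_of_lt (le_trans (hcore ▸ hLv) hle) hdiv
      have := (Nat.pow_lt_pow_iff_right (by omega : 1 < 2)).mp this
      omega
    exact ⟨s + j, hbound, by rw [hfin, hcore]⟩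
  · rintro ⟨s, hs, hw⟩
    have htL : t + L ≤ 32 := by
      have h1 : 2^(L-1) * 2^t ≤ v * 2^t := Nat.mul_le_mul_right _ hLv
      rw [ht, ← pow_add] at h1
      have : 2^(L-1+t) < 2^32 := lt_of_le_of_lt h1 hY
      have := (Nat.pow_lt_pow_iff_right (by omega : 1 < 2)).mp this
      omega
    refine ⟨s, by omega, L, by omega, t, by omega, ?_⟩
    rw [hw, ht, Nat.mod_eq_of_lt hY]

-- ===== VERDICT (by name: the statement is the Claim_ definition above) =====
theorem reachable_oracle_spec : Claim_equal_reachable_oracle := by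
  intro x y _
  unfold Spec_reachable_oracle
  have h : (reachable_oracle x y = true) ↔ (reachable_oracle_alt x y = true) := by
    rw [pv_bridgeA, pv_bridgeB]
    by_cases h0 : pvMaskN y = 0
    · simp [h0]
    · simp only [h0, false_or]
      exact pv_main (pvMaskN x) (pvMaskN y) (pv_maskN_lt x) (pv_maskN_lt y) h0
  cases hA : reachable_oracle x y <;> cases hB : reachable_oracle_alt x y <;> simp_all
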